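-- pv_equiv track=rewrite | github.com/nickm538/nickm538 | long_island_history/backend/api/history.py | _calculate_time_periods
-- ===== SOURCE A (Python) =====
-- from typing import Optional, List
--
-- def _calculate_time_periods(records: List[dict], events: List[dict]) -> List[str]:
--     """Calculate which time periods are covered by the search results."""
--     periods = set()
--     all_years = [r.get('year', 0) for r in records] + [e.get('year', 0) for e in events]
--
--     for year in all_years:
--         if year < 1700:
--             periods.add("Pre-Colonial (<1700)")
--         elif year < 1776:
--             periods.add("Colonial Era (1700-1776)")
--         elif year < 1800:
--             periods.add("Revolutionary Period (1776-1800)")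
--         elif year < 1865:
--             periods.add("Antebellum (1800-1865)")
--         elif year < 1900:
--             periods.add("Gilded Age (1865-1900)")
--         elif year < 1945:
--             periods.add("Early 20th Century (1900-1945)")
--         elif year < 1970:
--             periods.add("Post-War Era (1945-1970)")
--         else:
--             periods.add("Modern Era (1970-present)")
--
--     return sorted(list(periods))
-- ===== SOURCE B (Python) =====
-- from typing import Optional, List
--
-- # Alternative decomposition: instead of classifying each year and collecting a set,
-- # iterate over a prebuilt alphabetically-ordered table of (name, lo, hi) intervals
-- # and emit the name of each period whose interval contains at least one year.
-- _PERIODS = [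
--     ("Antebellum (1800-1865)", 1800, 1865),
--     ("Colonial Era (1700-1776)", 1700, 1776),
--     ("Early 20th Century (1900-1945)", 1900, 1945),
--     ("Gilded Age (1865-1900)", 1865, 1900),
--     ("Modern Era (1970-present)", 1970, None),
--     ("Post-War Era (1945-1970)", 1945, 1970),
--     ("Pre-Colonial (<1700)", None, 1700),
--     ("Revolutionary Period (1776-1800)", 1776, 1800),
-- ]
--
-- def _calculate_time_periods(records: List[dict], events: List[dict]) -> List[str]:
--     years = [d.get('year', 0) for d in records] + [d.get('year', 0) for d in events]
--     return [name for name, lo, hi in _PERIODS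
--             if any((lo is None or y >= lo) and (hi is None or y < hi) for y in years)]
-- ===== Notes on version B (the rewrite author's own statement) =====
-- stated objective: alternative
-- what changed: Inverts the loop structure: instead of classifying every year through an if/elif chain into a set and sorting it, B scans a prebuilt alphabetically-ordered table of (name, lo, hi) intervals and emits each period name whose interval contains at least one year (an any() existence test per period), with no set and no runtime sort.
import Mathlib
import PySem

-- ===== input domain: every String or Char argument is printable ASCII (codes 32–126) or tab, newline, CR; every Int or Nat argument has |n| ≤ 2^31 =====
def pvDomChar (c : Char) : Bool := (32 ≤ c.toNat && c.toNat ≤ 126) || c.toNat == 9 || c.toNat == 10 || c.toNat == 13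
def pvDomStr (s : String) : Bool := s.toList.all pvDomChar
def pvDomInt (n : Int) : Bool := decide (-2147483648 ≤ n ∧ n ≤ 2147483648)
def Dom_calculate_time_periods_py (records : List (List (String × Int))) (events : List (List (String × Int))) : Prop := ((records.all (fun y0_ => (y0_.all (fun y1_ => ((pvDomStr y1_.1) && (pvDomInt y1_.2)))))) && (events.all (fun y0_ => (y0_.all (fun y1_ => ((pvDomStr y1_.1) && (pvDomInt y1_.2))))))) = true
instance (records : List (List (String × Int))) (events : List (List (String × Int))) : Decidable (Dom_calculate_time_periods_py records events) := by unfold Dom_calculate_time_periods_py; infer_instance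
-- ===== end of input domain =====

-- B scans a prebuilt alphabetically-ordered table of period intervals and emits each
-- name whose interval contains some year (alternative decomposition; not claimed faster).

-- ===== PORT A =====
def calculate_time_periods_py (records : List (List (String × Int))) (events : List (List (String × Int))) : List String :=
  let all_years : List Int :=
    records.map (fun r => (PySem.Dict.mk r).getD "year" 0)
      ++ events.map (fun e => (PySem.Dict.mk e).getD "year" 0)
  let periods : PySem.Set String :=
    all_years.foldl (fun s y =>
      if y < 1700 then PySem.Set.add s "Pre-Colonial (<1700)"
      else if y < 1776 then PySem.Set.add s "Colonial Era (1700-1776)"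
      else if y < 1800 then PySem.Set.add s "Revolutionary Period (1776-1800)"
      else if y < 1865 then PySem.Set.add s "Antebellum (1800-1865)"
      else if y < 1900 then PySem.Set.add s "Gilded Age (1865-1900)"
      else if y < 1945 then PySem.Set.add s "Early 20th Century (1900-1945)"
      else if y < 1970 then PySem.Set.add s "Post-War Era (1945-1970)"
      else PySem.Set.add s "Modern Era (1970-present)") PySem.Set.empty
  PySem.List.sorted periods (fun x => x) false

-- ===== PORT B =====
-- alphabetically ordered (name, lo, hi) intervals; none = unbounded
def pvPeriods : List (String × Option Int × Option Int) :=
  [("Antebellum (1800-1865)", some 1800, some 1865),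
   ("Colonial Era (1700-1776)", some 1700, some 1776),
   ("Early 20th Century (1900-1945)", some 1900, some 1945),
   ("Gilded Age (1865-1900)", some 1865, some 1900),
   ("Modern Era (1970-present)", some 1970, none),
   ("Post-War Era (1945-1970)", some 1945, some 1970),
   ("Pre-Colonial (<1700)", none, some 1700),
   ("Revolutionary Period (1776-1800)", some 1776, some 1800)]

-- (lo is None or y >= lo) and (hi is None or y < hi)
def pvInPeriod (lo hi : Option Int) (y : Int) : Bool :=
  (match lo with | none => true | some l => decide (y ≥ l)) &&
  (match hi with | none => true | some h => decide (y < h))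

def calculate_time_periods_py_alt (records : List (List (String × Int))) (events : List (List (String × Int))) : List String :=
  let years : List Int :=
    records.map (fun d => (PySem.Dict.mk d).getD "year" 0)
      ++ events.map (fun d => (PySem.Dict.mk d).getD "year" 0)
  (pvPeriods.filter (fun p => years.any (fun y => pvInPeriod p.2.1 p.2.2 y))).map (fun p => p.1)

-- ===== PRECONDITION & SPEC =====
def Spec_calculate_time_periods_py (records : List (List (String × Int))) (events : List (List (String × Int))) (out : List String) : Prop := out = calculate_time_periods_py_alt records events
instance (records : List (List (String × Int))) (events : List (List (String × Int))) (out : List String) : Decidable (Spec_calculate_time_periods_py records events out) := by unfold Spec_calculate_time_periods_py; infer_instance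

-- ===== CLAIM (what is proved, stated in full; the proofs are below) =====
def Claim_equal_calculate_time_periods_py : Prop := ∀ (records : List (List (String × Int))) (events : List (List (String × Int))), Dom_calculate_time_periods_py records events → Spec_calculate_time_periods_py records events (calculate_time_periods_py records events)

-- ===== LEMMAS AND PROOFS =====

-- name A's classification chain
def pvClassify (y : Int) : String :=
  if y < 1700 then "Pre-Colonial (<1700)"
  else if y < 1776 then "Colonial Era (1700-1776)"
  else if y < 1800 then "Revolutionary Period (1776-1800)"
  else if y < 1865 then "Antebellum (1800-1865)"
  else if y < 1900 then "Gilded Age (1865-1900)"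
  else if y < 1945 then "Early 20th Century (1900-1945)"
  else if y < 1970 then "Post-War Era (1945-1970)"
  else "Modern Era (1970-present)"

theorem bodyA_eq (s : PySem.Set String) (y : Int) :
    (if y < 1700 then PySem.Set.add s "Pre-Colonial (<1700)"
      else if y < 1776 then PySem.Set.add s "Colonial Era (1700-1776)"
      else if y < 1800 then PySem.Set.add s "Revolutionary Period (1776-1800)"
      else if y < 1865 then PySem.Set.add s "Antebellum (1800-1865)"
      else if y < 1900 then PySem.Set.add s "Gilded Age (1865-1900)"
      else if y < 1945 then PySem.Set.add s "Early 20th Century (1900-1945)"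
      else if y < 1970 then PySem.Set.add s "Post-War Era (1945-1970)"
      else PySem.Set.add s "Modern Era (1970-present)")
      = PySem.Set.add s (pvClassify y) := by
  unfold pvClassify; split_ifs <;> rfl

-- a year lies in a table period iff A's chain classifies it with that period's name
theorem period_iff (p : String × Option Int × Option Int) (hp : p ∈ pvPeriods) (y : Int) :
    pvInPeriod p.2.1 p.2.2 y = true ↔ pvClassify y = p.1 := by
  unfold pvClassify
  simp only [pvPeriods, List.mem_cons, List.not_mem_nil, or_false] at hp
  rcases hp with rfl | rfl | rfl | rfl | rfl | rfl | rfl | rfl <;>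
    (simp only [pvInPeriod, Bool.and_eq_true, decide_eq_true_eq] <;>
     split_ifs <;> simp <;> omega)

-- every year's classification is the name of some table period containing it
theorem classify_covered (y : Int) :
    ∃ p ∈ pvPeriods, p.1 = pvClassify y ∧ pvInPeriod p.2.1 p.2.2 y = true := by
  unfold pvClassify
  split_ifs with h1 h2 h3 h4 h5 h6 h7
  · exact ⟨("Pre-Colonial (<1700)", none, some 1700), by decide, rfl,
      by simp [pvInPeriod]; omega⟩
  · exact ⟨("Colonial Era (1700-1776)", some 1700, some 1776), by decide, rfl,
      by simp [pvInPeriod]; omega⟩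
  · exact ⟨("Revolutionary Period (1776-1800)", some 1776, some 1800), by decide, rfl,
      by simp [pvInPeriod]; omega⟩
  · exact ⟨("Antebellum (1800-1865)", some 1800, some 1865), by decide, rfl,
      by simp [pvInPeriod]; omega⟩
  · exact ⟨("Gilded Age (1865-1900)", some 1865, some 1900), by decide, rfl,
      by simp [pvInPeriod]; omega⟩
  · exact ⟨("Early 20th Century (1900-1945)", some 1900, some 1945), by decide, rfl,
      by simp [pvInPeriod]; omega⟩
  · exact ⟨("Post-War Era (1945-1970)", some 1945, some 1970), by decide, rfl,
      by simp [pvInPeriod]; omega⟩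
  · exact ⟨("Modern Era (1970-present)", some 1970, none), by decide, rfl,
      by simp [pvInPeriod]; omega⟩

-- the table's name column is strictly increasing and duplicate-free
theorem pvTable_pairwise : (pvPeriods.map (fun p => p.1)).Pairwise (· < ·) := by
  apply List.Pairwise.imp (fun {a b} h => String.lt_iff_toList_lt.mpr h)
  decide

theorem pvTable_nodup : (pvPeriods.map (fun p => p.1)).Nodup := by decide

-- ===== VERDICT (by name: the statement is the Claim_ definition above) =====
theorem calculate_time_periods_py_spec : Claim_equal_calculate_time_periods_py := by
  intro records events _
  unfold Spec_calculate_time_periods_py calculate_time_periods_py calculate_time_periods_py_alt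
  simp only [bodyA_eq]
  set ys : List Int :=
    records.map (fun r => (PySem.Dict.mk r).getD "year" 0)
      ++ events.map (fun e => (PySem.Dict.mk e).getD "year" 0) with hys
  have hset :
      ys.foldl (fun s y => PySem.Set.add s (pvClassify y)) PySem.Set.empty
        = PySem.Set.ofList (ys.map pvClassify) := by
    rw [PySem.Set.ofList_eq_foldl, List.foldl_map]; rfl
  rw [hset]
  have hsub : ((pvPeriods.filter (fun p => ys.any (fun y => pvInPeriod p.2.1 p.2.2 y))).map
      (fun p => p.1)).Sublist (pvPeriods.map (fun p => p.1)) :=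
    List.Sublist.map _ List.filter_sublist
  apply PySem.List.sorted_eq_of_perm_of_pairwise_lt
  · rw [List.perm_ext_iff_of_nodup]
    · intro x
      simp only [List.mem_map, List.mem_filter, PySem.Set.mem_ofList, List.any_eq_true]
      constructor
      · rintro ⟨p, ⟨hp, y, hy, hin⟩, rfl⟩
        exact ⟨y, hy, (period_iff p hp y).mp hin⟩
      · rintro ⟨y, hy, rfl⟩
        obtain ⟨p, hp, hname, hin⟩ := classify_covered y
        exact ⟨p, ⟨hp, y, hy, hin⟩, hname⟩
    · exact List.Nodup.sublist hsub pvTable_nodup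
    · exact PySem.Set.nodup_ofList _
  · exact List.Pairwise.sublist hsub pvTable_pairwise
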